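-- pv_equiv track=rewrite | github.com/Abeeby/Scrapping | app/scrapers/rf_geneve.py | _parse_nom
-- ===== SOURCE A (Python) =====
-- from typing import Any, Dict, List, Optional, Tuple
--
-- def _parse_nom(nom_complet: str) -> Tuple[str, str]:
--     """Parse un nom complet en nom et prénom."""
--     nom_complet = nom_complet.strip()
--
--     # Format "NOM Prénom"
--     parts = nom_complet.split()
--     if len(parts) >= 2:
--         # Heuristique: partie en majuscules = nom de famille
--         nom_parts = []
--         prenom_parts = []
--         for part in parts:
--             if part.isupper() or (len(part) > 1 and part[0].isupper() and part[1:].islower()):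
--                 if not prenom_parts:
--                     nom_parts.append(part)
--                 else:
--                     prenom_parts.append(part)
--             else:
--                 prenom_parts.append(part)
--
--         if nom_parts and prenom_parts:
--             return " ".join(nom_parts), " ".join(prenom_parts)
--
--         # Sinon premier = nom, reste = prénom
--         return parts[0], " ".join(parts[1:])
--
--     return nom_complet, ""
-- ===== SOURCE B (Python) =====
-- def _is_nom(part):
--     return part.isupper() or (len(part) > 1 and part[0].isupper() and part[1:].islower())
--
--
-- def _split(words):
--     """Recursively peel leading name-like words, building the surname string
--     directly; the forename is None when every word was consumed as surname."""
--     head, rest = words[0], words[1:]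
--     if not _is_nom(head):
--         return "", " ".join(words)
--     if not rest:
--         return head, None
--     nom, prenom = _split(rest)
--     return (head + " " + nom if nom else head), prenom
--
--
-- def _parse_nom(nom_complet):
--     """Parse un nom complet en nom et prénom."""
--     words = nom_complet.strip().split()
--     if len(words) < 2:
--         return nom_complet.strip(), ""
--     nom, prenom = _split(words)
--     if nom and prenom is not None:
--         return nom, prenom
--     return words[0], " ".join(words[1:])
-- ===== Notes on version B (the rewrite author's own statement) =====
-- stated objective: alternative
-- what changed: Replaces A's iterative loop with two accumulator lists and a prenom-nonempty flag (joined afterwards) by a recursion over the word list that builds the surname string directly and uses None to signal that no forename word was left.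
import Mathlib
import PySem

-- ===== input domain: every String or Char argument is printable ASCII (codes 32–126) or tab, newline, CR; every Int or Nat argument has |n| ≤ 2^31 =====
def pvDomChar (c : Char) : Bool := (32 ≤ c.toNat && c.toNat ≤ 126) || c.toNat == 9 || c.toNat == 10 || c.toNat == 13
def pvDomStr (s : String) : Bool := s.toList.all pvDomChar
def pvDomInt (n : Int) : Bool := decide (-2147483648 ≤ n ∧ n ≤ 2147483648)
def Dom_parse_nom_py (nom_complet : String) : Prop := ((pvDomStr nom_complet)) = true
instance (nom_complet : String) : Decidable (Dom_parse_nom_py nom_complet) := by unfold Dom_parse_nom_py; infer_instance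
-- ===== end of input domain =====

-- B replaces A's iterative loop with two accumulator lists (joined at the end) by a recursion over
-- the word list that builds the surname string directly, with None signalling "no forename left"
-- ("alternative"); same result, same O(n) cost.

-- ===== PORT A =====
-- str.isupper()/islower(): on the ASCII domain the cased characters are exactly the letters,
-- so `s.isupper()` = some letter present ∧ every letter uppercase (exact on Dom; ported by hand,
-- PySem has only the per-char predicates).
def pvStrIsupper (cs : List Char) : Bool :=
  cs.any PySem.Chars.isalpha && cs.all (fun c => !PySem.Chars.isalpha c || PySem.Chars.isupper c)

def pvStrIslower (cs : List Char) : Bool :=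
  cs.any PySem.Chars.isalpha && cs.all (fun c => !PySem.Chars.isalpha c || PySem.Chars.islower c)

-- the token predicate of A's loop (the same predicate `_is_nom` is reused by Source B)
def pvIsNom (part : String) : Bool :=
  let cs := part.toList
  -- part[0].isupper() on a one-char string of the split (nonempty): cased ∧ upper = Chars.isupper
  pvStrIsupper cs || (decide (cs.length > 1) && PySem.Chars.isupper (cs.headD ' ') && pvStrIslower cs.tail)

-- the body of A's for-loop over `parts` (state = (nom_parts, prenom_parts))
def pvStep (acc : List String × List String) (part : String) : List String × List String :=
  if pvIsNom part then
    if acc.2 = [] then (acc.1 ++ [part], acc.2) else (acc.1, acc.2 ++ [part])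
  else (acc.1, acc.2 ++ [part])

def parse_nom_py (nom_complet : String) : String × String :=
  let s := PySem.Str.strip nom_complet
  let parts := PySem.Str.split₀ s
  if parts.length ≥ 2 then
    let st := parts.foldl pvStep ([], [])
    if st.1 ≠ [] ∧ st.2 ≠ [] then (PySem.Str.join " " st.1, PySem.Str.join " " st.2)
    else (parts.headD "", PySem.Str.join " " (parts.drop 1))
  else (s, "")

-- ===== PORT B =====
-- Source B's recursive `_split`: peel leading name-like words, building the surname string directly;
-- `none` = forename missing (every word consumed).  `head + " " + nom` ported as join " " [head, nom].
def pvSplit : List String → String × Option String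
  | [] => ("", none)  -- unreachable: _split is only called on nonempty lists
  | x :: xs =>
    if !pvIsNom x then ("", PySem.Str.join " " (x :: xs))
    else
      match xs with
      | [] => (x, none)
      | _ :: _ =>
        let r := pvSplit xs
        ((if r.1 ≠ "" then PySem.Str.join " " [x, r.1] else x), r.2)

def parse_nom_py_alt (nom_complet : String) : String × String :=
  let s := PySem.Str.strip nom_complet
  let words := PySem.Str.split₀ s
  if words.length < 2 then (s, "")
  else
    match pvSplit words with
    | (nom, some prenom) =>
      if nom ≠ "" then (nom, prenom)
      else (words.headD "", PySem.Str.join " " (words.drop 1))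
    | (_, none) => (words.headD "", PySem.Str.join " " (words.drop 1))

-- ===== PRECONDITION & SPEC =====
def Spec_parse_nom_py (nom_complet : String) (out : String × String) : Prop := out = parse_nom_py_alt nom_complet
instance (nom_complet : String) (out : String × String) : Decidable (Spec_parse_nom_py nom_complet out) := by unfold Spec_parse_nom_py; infer_instance

-- ===== CLAIM (what is proved, stated in full; the proofs are below) =====
def Claim_equal_parse_nom_py : Prop := ∀ (nom_complet : String), Dom_parse_nom_py nom_complet → Spec_parse_nom_py nom_complet (parse_nom_py nom_complet)

-- ===== LEMMAS AND PROOFS =====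

-- A's loop: once prenom is nonempty, everything is appended to it
theorem pvFold_pp_ne (l : List String) (np pp : List String) (h : pp ≠ []) :
    l.foldl pvStep (np, pp) = (np, pp ++ l) := by
  induction l generalizing pp with
  | nil => simp
  | cons x xs ih =>
    simp only [List.foldl_cons, pvStep]
    split_ifs <;> simp_all

-- A's loop from an empty prenom: nom = leading matching run, prenom = the rest
theorem pvFold_main (l : List String) (np : List String) :
    l.foldl pvStep (np, []) = (np ++ l.takeWhile pvIsNom, l.drop (l.takeWhile pvIsNom).length) := by
  induction l generalizing np with
  | nil => simp
  | cons x xs ih =>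
    simp only [List.foldl_cons, pvStep, List.takeWhile_cons]
    by_cases hx : pvIsNom x
    · simp only [hx, if_true]
      rw [ih]
      simp
    · simp [hx, pvFold_pp_ne]

theorem pvJoin_nil : PySem.Str.join " " [] = "" := by
  apply String.toList_inj.mp
  simp [PySem.Str.toList_join, PySem.Chars.join_nil]

theorem pvJoin_singleton (x : String) : PySem.Str.join " " [x] = x := by
  apply String.toList_inj.mp
  simp [PySem.Str.toList_join, PySem.Chars.join_singleton]

theorem pvJoin_two (x y : String) (ys : List String) :
    PySem.Str.join " " [x, PySem.Str.join " " (y :: ys)] = PySem.Str.join " " (x :: y :: ys) := by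
  apply String.toList_inj.mp
  simp [PySem.Str.toList_join, PySem.Chars.join_cons_cons, PySem.Chars.join_singleton]

theorem pvIsNom_ne (x : String) (h : pvIsNom x = true) : x ≠ "" := by
  intro hx; subst hx; exact absurd h (by decide)

theorem pvJoin_cons_ne (x : String) (t : List String) (hx : x ≠ "") :
    PySem.Str.join " " (x :: t) ≠ "" := by
  intro h
  have h' := congrArg String.toList h
  have hx' : x.toList ≠ [] := fun hc => hx (String.toList_inj.mp (by simpa using hc))
  cases t with
  | nil => exact hx' (by simpa [PySem.Str.toList_join, PySem.Chars.join_singleton] using h')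
  | cons y ys =>
    rw [PySem.Str.toList_join] at h'
    simp only [List.map, PySem.Chars.join_cons_cons] at h'
    rcases List.append_eq_nil_iff.mp (List.append_eq_nil_iff.mp h').1 with ⟨h1, _⟩
    exact hx' h1

-- Source B's recursion computes the same split as A's loop: surname = join of the leading matching
-- run, forename = none iff that run is the whole list, else join of the rest
theorem pvSplit_eq (l : List String) (hl : l ≠ []) :
    pvSplit l = (PySem.Str.join " " (l.takeWhile pvIsNom),
      if l.drop (l.takeWhile pvIsNom).length = [] then none
      else some (PySem.Str.join " " (l.drop (l.takeWhile pvIsNom).length))) := by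
  induction l with
  | nil => exact absurd rfl hl
  | cons x xs ih =>
    simp only [pvSplit, List.takeWhile_cons]
    by_cases hx : pvIsNom x
    · simp only [hx, Bool.not_true, Bool.false_eq_true, if_false]
      cases xs with
      | nil => simp [pvJoin_singleton]
      | cons y ys =>
        rw [ih (by simp)]
        by_cases hy : pvIsNom y
        · -- takeWhile xs nonempty → r.1 = join (y-run) ≠ ""
          have hyt : (y :: ys).takeWhile pvIsNom = y :: ys.takeWhile pvIsNom := by
            simp [hy]
          have hne : PySem.Str.join " " ((y :: ys).takeWhile pvIsNom) ≠ "" := by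
            rw [hyt]; exact pvJoin_cons_ne _ _ (pvIsNom_ne y hy)
          simp only [if_pos hne]
          rw [hyt, pvJoin_two]
          simp
        · -- takeWhile xs = [] → r.1 = "" → result x = join [x]
          have hyt : (y :: ys).takeWhile pvIsNom = [] := by
            simp [hy]
          simp [hyt, pvJoin_nil, pvJoin_singleton]
    · simp [hx, pvJoin_nil]

-- ===== VERDICT (by name: the statement is the Claim_ definition above) =====
theorem parse_nom_py_spec : Claim_equal_parse_nom_py := by
  intro nom_complet _
  unfold Spec_parse_nom_py parse_nom_py parse_nom_py_alt
  simp only [pvFold_main, List.nil_append]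
  set s := PySem.Str.strip nom_complet with hs
  set parts := PySem.Str.split₀ s with hparts
  clear_value s parts
  by_cases hlen : parts.length ≥ 2
  · rw [if_pos hlen, if_neg (show ¬ parts.length < 2 by omega),
      pvSplit_eq parts (by rintro rfl; simp at hlen)]
    set T := parts.takeWhile pvIsNom with hT
    by_cases hd : parts.drop T.length = []
    · -- forename side empty in both: A's condition fails, B matches none → same fallback
      rw [if_pos hd, if_neg (by rintro ⟨-, h2⟩; exact h2 hd)]
    · rw [if_neg hd]
      by_cases hT0 : T = []
      · -- surname side empty: A's condition fails, B's nom = "" → same fallback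
        rw [if_neg (by rintro ⟨h1, -⟩; exact h1 hT0)]
        simp [hT0, pvJoin_nil]
      · obtain ⟨a, t, hat⟩ := List.exists_cons_of_ne_nil hT0
        have ha : pvIsNom a = true := by
          have : a ∈ T := by rw [hat]; exact List.mem_cons_self
          exact List.mem_takeWhile_imp (hT ▸ this)
        have hne : PySem.Str.join " " T ≠ "" := by
          rw [hat]; exact pvJoin_cons_ne _ _ (pvIsNom_ne a ha)
        rw [if_pos ⟨hT0, hd⟩]
        simp [hne]
  · rw [if_neg hlen, if_pos (show parts.length < 2 by omega)]
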